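-- pv_equiv track=rewrite | github.com/shahpriyesh/PracticeCode | ArrayQuestions/HowManyNumberAreSmallerThanCurrentNumber.py | smallerThanCurrent
-- ===== SOURCE A (Python) =====
-- def smallerThanCurrent(nums):
--     nums = [(nums[i], i) for i in range(len(nums))]
--     nums.sort(key=lambda x: x[0])
--
--     prev = -1
--     prev_idx = 0
--     res = [0]*len(nums)
--     for i in range(len(nums)):
--         if nums[i][0] == prev:
--             res[nums[i][1]] = prev_idx
--         else:
--             res[nums[i][1]] = i
--             prev_idx = i
--         prev = nums[i][0]
--
--     return res
-- ===== SOURCE B (Python) =====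
-- def smallerThanCurrent(nums):
--     return [sum(1 for x in nums if x < v) for v in nums]
-- ===== Notes on version B (the rewrite author's own statement) =====
-- stated objective: simpler
-- what changed: Replaced the sort-index-pairs-then-scan-with-prev/prev_idx bookkeeping by a one-line direct count: each output entry is the number of elements strictly smaller than the current one.
import Mathlib
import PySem

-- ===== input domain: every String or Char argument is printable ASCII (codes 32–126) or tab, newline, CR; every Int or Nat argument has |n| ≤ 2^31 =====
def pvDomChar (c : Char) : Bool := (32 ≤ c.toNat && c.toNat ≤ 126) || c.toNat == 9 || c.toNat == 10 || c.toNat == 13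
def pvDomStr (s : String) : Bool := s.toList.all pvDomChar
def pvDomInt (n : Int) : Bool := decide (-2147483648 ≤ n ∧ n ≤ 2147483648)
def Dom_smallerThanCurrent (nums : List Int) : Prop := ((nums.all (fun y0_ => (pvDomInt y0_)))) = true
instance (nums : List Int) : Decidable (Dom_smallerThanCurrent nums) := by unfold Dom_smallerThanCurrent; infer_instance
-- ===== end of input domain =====

-- B replaces A's sort-the-index-pairs-then-scan-with-prev/prev_idx bookkeeping by the direct per-element strict-smaller count (simpler; not faster).


-- ===== PORT A =====
def smallerThanCurrent (nums : List Int) : List Int :=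
  -- nums = [(nums[i], i) for i in range(len(nums))]
  let nums1 : List (Int × Int) :=
    (PySem.List.pyRange 0 (PySem.List.len nums) 1).map (fun i => (PySem.List.pyGetD nums i 0, i))
  -- nums.sort(key=lambda x: x[0])
  let nums2 := PySem.List.sorted nums1 (fun x => x.1) false
  -- prev = -1; prev_idx = 0; res = [0]*len(nums); for i in range(len(nums)): …
  let st :=
    (PySem.List.pyRange 0 (PySem.List.len nums2) 1).foldl
      (fun (st : Int × Int × List Int) i =>
        let p := PySem.List.pyGetD nums2 i (0, 0)
        if p.1 = st.1 then
          (p.1, st.2.1, PySem.List.pySetD st.2.2 p.2 st.2.1)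
        else
          (p.1, i, PySem.List.pySetD st.2.2 p.2 i))
      ((-1 : Int), (0 : Int), PySem.List.pyRepeat [(0 : Int)] (PySem.List.len nums2))
  st.2.2

-- ===== PORT B =====
-- [sum(1 for x in nums if x < v) for v in nums]
def smallerThanCurrent_alt (nums : List Int) : List Int :=
  nums.map (fun v => nums.foldl (fun acc x => if x < v then acc + 1 else acc) (0 : Int))

-- ===== PRECONDITION & SPEC =====
def Spec_smallerThanCurrent (nums : List Int) (out : List Int) : Prop := out = smallerThanCurrent_alt nums
instance (nums : List Int) (out : List Int) : Decidable (Spec_smallerThanCurrent nums out) := by unfold Spec_smallerThanCurrent; infer_instance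

-- ===== CLAIM (what is proved, stated in full; the proofs are below) =====
def Claim_equal_smallerThanCurrent : Prop := ∀ (nums : List Int), Dom_smallerThanCurrent nums → Spec_smallerThanCurrent nums (smallerThanCurrent nums)

-- ===== LEMMAS AND PROOFS =====

-- The loop body of A, as a function of the (index, pair) element produced by enumerate on the sorted list.
def pvStep (st : Int × Int × List Int) (q : Int × (Int × Int)) : Int × Int × List Int :=
  if q.2.1 = st.1 then (q.2.1, st.2.1, PySem.List.pySetD st.2.2 q.2.2 st.2.1)
  else (q.2.1, q.1, PySem.List.pySetD st.2.2 q.2.2 q.1)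

lemma pv_count_eq (u t' : List (Int × Int)) (x : Int × Int)
    (hpw : ((u ++ x :: t').Pairwise (fun a b => a.1 ≤ b.1)))
    (hstrict : ∀ y ∈ u, y.1 < x.1) :
    (u ++ x :: t').countP (fun q => decide (q.1 < x.1)) = u.length := by
  rw [List.countP_append]
  have h1 : u.countP (fun q => decide (q.1 < x.1)) = u.length := by
    rw [List.countP_eq_length]
    intro y hy; simpa using hstrict y hy
  have hpw2 : (x :: t').Pairwise (fun a b => a.1 ≤ b.1) := (List.pairwise_append.1 hpw).2.1
  have h2 : (x :: t').countP (fun q => decide (q.1 < x.1)) = 0 := by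
    rw [List.countP_eq_zero]
    intro q hq
    rcases List.mem_cons.1 hq with rfl | hq
    · simp
    · have := (List.pairwise_cons.1 hpw2).1 q hq
      simpa using not_lt.2 this
  omega

lemma pv_loop_inv (s : List (Int × Int))
    (hpw : s.Pairwise (fun a b => a.1 ≤ b.1))
    (hnd : (s.map (fun p => p.2)).Nodup)
    (hnn : ∀ p ∈ s, 0 ≤ p.2)
    (hub : ∀ p ∈ s, p.2 < (s.length : Int)) :
    ∀ (t u : List (Int × Int)) (prev pidx : Int) (res : List Int),
    s = u ++ t →
    ((u = [] ∧ prev = -1 ∧ pidx = 0) ∨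
      ((∀ y ∈ u, y.1 ≤ prev) ∧ prev ∈ u.map (fun p => p.1) ∧
        pidx = (s.countP (fun p => decide (p.1 < prev)) : Int))) →
    res.length = s.length →
    (∀ j (hj : j < u.length), res.getD (u[j]).2.toNat 0 =
        (s.countP (fun q => decide (q.1 < (u[j]).1)) : Int)) →
    ((PySem.List.enumerate t (u.length : Int)).foldl pvStep (prev, pidx, res)).2.2.length = s.length ∧
    (∀ j (hj : j < s.length),
      ((PySem.List.enumerate t (u.length : Int)).foldl pvStep (prev, pidx, res)).2.2.getD (s[j]).2.toNat 0 =
        (s.countP (fun q => decide (q.1 < (s[j]).1)) : Int)) := by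
  intro t
  induction t with
  | nil =>
    intro u prev pidx res hs hB hlen hres
    simp only [PySem.List.enumerate_nil, List.foldl_nil]
    have hu : u = s := by simpa using hs.symm
    subst hu
    exact ⟨hlen, fun j hj => hres j hj⟩
  | cons x t' ih =>
    intro u prev pidx res hs hB hlen hres
    rw [PySem.List.enumerate_cons, List.foldl_cons]
    -- facts about x
    have hxs : x ∈ s := by rw [hs]; exact List.mem_append_right _ (List.mem_cons_self)
    have hx2nn : 0 ≤ x.2 := hnn x hxs
    have hx2ub : x.2 < (s.length : Int) := hub x hxs
    have hx2lt : x.2.toNat < res.length := by rw [hlen]; omega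
    have hx2notin : x.2 ∉ u.map (fun p => p.2) := by
      have h : (u.map (fun p => p.2) ++ x.2 :: t'.map (fun p => p.2)).Nodup := by
        simpa [hs] using hnd
      intro hin
      exact (List.nodup_append.1 h).2.2 _ hin x.2 List.mem_cons_self rfl
    have hne2 : ∀ j (hj : j < u.length), (u[j]).2.toNat ≠ x.2.toNat := by
      intro j hj heq
      have hmem : (u[j]).2 ∈ u.map (fun p => p.2) := List.mem_map_of_mem (List.getElem_mem hj)
      have hjnn : 0 ≤ (u[j]).2 := hnn _ (by rw [hs]; exact List.mem_append_left _ (List.getElem_mem hj))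
      have : (u[j]).2 = x.2 := by omega
      exact hx2notin (this ▸ hmem)
    have hpw' : ((u ++ x :: t').Pairwise (fun a b => a.1 ≤ b.1)) := hs ▸ hpw
    -- ∀ q ∈ x :: t', x.1 ≤ q.1
    have hmin : ∀ q ∈ x :: t', x.1 ≤ q.1 := by
      intro q hq
      rcases List.mem_cons.1 hq with rfl | hq
      · exact le_refl _
      · exact (List.pairwise_cons.1 (List.pairwise_append.1 hpw').2.1).1 q hq
    -- the value assigned/kept equals the count, and hstrict for the else branch
    by_cases hcond : x.1 = prev
    · -- then branch
      have hval : pidx = (s.countP (fun q => decide (q.1 < x.1)) : Int) := by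
        rcases hB with ⟨hu, hprev, hpidx⟩ | ⟨_, _, hpidx⟩
        · subst hu
          have : s.countP (fun q => decide (q.1 < x.1)) = 0 := by
            rw [List.countP_eq_zero]
            intro q hq
            have : x.1 ≤ q.1 := hmin q (by simpa [hs] using hq)
            simpa using not_lt.2 this
          rw [this, hpidx]; simp
        · rw [hcond, hpidx]
      have hstep : pvStep (prev, pidx, res) ((u.length : Int), x)
          = (x.1, pidx, res.set x.2.toNat pidx) := by
        simp [pvStep, hcond, PySem.List.pySetD_of_nonneg _ _ hx2nn]
      rw [hstep]
      have hlen' : ((u.length : Int) + 1) = ((u ++ [x]).length : Int) := by simp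
      rw [hlen']
      apply ih (u ++ [x]) x.1 pidx (res.set x.2.toNat pidx)
      · rw [hs]; simp
      · right
        refine ⟨?_, by simp, hval⟩
        intro y hy
        rcases List.mem_append.1 hy with hy | hy
        · rcases hB with ⟨hu, _, _⟩ | ⟨hle, _, _⟩
          · subst hu; simp at hy
          · exact (hle y hy).trans (le_of_eq hcond.symm)
        · simp at hy; subst hy; exact le_refl _
      · simpa using hlen
      · intro j hj
        simp only [List.length_append, List.length_cons, List.length_nil] at hj
        by_cases hju : j < u.length
        · rw [List.getElem_append_left hju]
          rw [List.getD_eq_getElem?_getD, List.getElem?_set_ne (Ne.symm (hne2 j hju)),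
            ← List.getD_eq_getElem?_getD]
          exact hres j hju
        · have hj' : j = u.length := by omega
          subst hj'
          rw [List.getElem_concat_length rfl]
          rw [List.getD_eq_getElem?_getD, List.getElem?_set_self hx2lt]
          simp only [Option.getD_some]
          exact_mod_cast hval
    · -- else branch
      have hstrict : ∀ y ∈ u, y.1 < x.1 := by
        intro y hy
        rcases hB with ⟨hu, _, _⟩ | ⟨hle, hmem, _⟩
        · subst hu; simp at hy
        · rcases List.mem_map.1 hmem with ⟨z, hz, hzv⟩
          have hzx : z.1 ≤ x.1 := (List.pairwise_append.1 hpw').2.2 z hz x (List.mem_cons_self)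
          have : prev ≤ x.1 := hzv ▸ hzx
          have hlt : prev < x.1 := lt_of_le_of_ne this (fun h => hcond h.symm)
          exact lt_of_le_of_lt (hle y hy) hlt
      have hcount : s.countP (fun q => decide (q.1 < x.1)) = u.length := by
        rw [hs]; exact pv_count_eq u t' x hpw' hstrict
      have hval : (u.length : Int) = (s.countP (fun q => decide (q.1 < x.1)) : Int) := by
        rw [hcount]
      have hstep : pvStep (prev, pidx, res) ((u.length : Int), x)
          = (x.1, (u.length : Int), res.set x.2.toNat (u.length : Int)) := by
        simp [pvStep, hcond, PySem.List.pySetD_of_nonneg _ _ hx2nn]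
      rw [hstep]
      have hlen' : ((u.length : Int) + 1) = ((u ++ [x]).length : Int) := by simp
      rw [hlen']
      apply ih (u ++ [x]) x.1 (u.length : Int) (res.set x.2.toNat (u.length : Int))
      · rw [hs]; simp
      · right
        refine ⟨?_, by simp, hval⟩
        intro y hy
        rcases List.mem_append.1 hy with hy | hy
        · exact le_of_lt (hstrict y hy)
        · simp at hy; subst hy; exact le_refl _
      · simpa using hlen
      · intro j hj
        simp only [List.length_append, List.length_cons, List.length_nil] at hj
        by_cases hju : j < u.length
        · rw [List.getElem_append_left hju]
          rw [List.getD_eq_getElem?_getD, List.getElem?_set_ne (Ne.symm (hne2 j hju)),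
            ← List.getD_eq_getElem?_getD]
          exact hres j hju
        · have hj' : j = u.length := by omega
          subst hj'
          rw [List.getElem_concat_length rfl]
          rw [List.getD_eq_getElem?_getD, List.getElem?_set_self hx2lt]
          simp only [Option.getD_some]
          exact_mod_cast hval

theorem pv_main (nums : List Int) :
    smallerThanCurrent nums = smallerThanCurrent_alt nums := by
  -- name the pieces
  set nums1 : List (Int × Int) :=
    (PySem.List.pyRange 0 (PySem.List.len nums) 1).map (fun i => (PySem.List.pyGetD nums i 0, i)) with hnums1
  set s := PySem.List.sorted nums1 (fun x => x.1) false with hsdef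
  -- nums1 in enumerate form
  have hpairs : nums1 = (PySem.List.enumerate nums 0).map (fun q => (q.2, q.1)) := by
    rw [PySem.List.enumerate_eq_map_pyRange nums 0, List.map_map]
    rfl
  have hlen1 : nums1.length = nums.length := by
    rw [hpairs, List.length_map, PySem.List.length_enumerate]
  have hperm : s.Perm nums1 := PySem.List.sorted_perm nums1 (fun x => x.1) false
  have hlens : s.length = nums.length := by
    rw [hsdef, PySem.List.length_sorted, hlen1]
  have hpw : s.Pairwise (fun a b => a.1 ≤ b.1) := PySem.List.sorted_pairwise nums1 (fun x => x.1)
  have hsndmap : nums1.map (fun p => p.2) = PySem.List.pyRange 0 (nums.length : Int) 1 := by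
    rw [hpairs, List.map_map]
    have : ((fun p : Int × Int => p.2) ∘ (fun q : Int × Int => (q.2, q.1))) = (fun q : Int × Int => q.1) := rfl
    rw [this, PySem.List.map_fst_enumerate]
    norm_num
  have hpermsnd : (s.map (fun p => p.2)).Perm (PySem.List.pyRange 0 (nums.length : Int) 1) := by
    rw [← hsndmap]; exact hperm.map _
  have hnd : (s.map (fun p => p.2)).Nodup := hpermsnd.nodup_iff.2 (PySem.List.nodup_pyRange_one _ _)
  have hmem2 : ∀ p ∈ s, 0 ≤ p.2 ∧ p.2 < (nums.length : Int) := by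
    intro p hp
    have : p.2 ∈ s.map (fun p => p.2) := List.mem_map_of_mem hp
    have := hpermsnd.mem_iff.1 this
    exact PySem.List.mem_pyRange_one.1 this
  -- characterize members of s
  have hmemval : ∀ p ∈ s, ∃ (m : Nat) (hm : m < nums.length), p = (nums[m], (m : Int)) := by
    intro p hp
    have hp1 : p ∈ nums1 := hperm.mem_iff.1 hp
    rw [hpairs] at hp1
    rcases List.mem_map.1 hp1 with ⟨q, hq, rfl⟩
    rcases (PySem.List.mem_enumerate_iff nums 0 q).1 hq with ⟨m, hm, rfl⟩
    exact ⟨m, hm, by norm_num⟩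
  -- count transfer
  have hcount : ∀ v : Int, s.countP (fun q => decide (q.1 < v)) = nums.countP (fun x => decide (x < v)) := by
    intro v
    rw [hperm.countP_eq, hpairs, List.countP_map]
    conv_rhs => rw [← PySem.List.map_snd_enumerate nums 0, List.countP_map]
    rfl
  -- the loop lemma
  have hloop := pv_loop_inv s hpw hnd (fun p hp => (hmem2 p hp).1)
      (fun p hp => hlens ▸ (hmem2 p hp).2) s [] (-1) 0
      (List.replicate nums.length (0 : Int)) (by simp) (Or.inl ⟨rfl, rfl, rfl⟩)
      (by simp [hlens]) (by intro j hj; simp at hj)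
  simp only [List.length_nil, Nat.cast_zero] at hloop
  -- rewrite the port's fold into pvStep/enumerate form
  have hport : smallerThanCurrent nums =
      ((PySem.List.enumerate s 0).foldl pvStep
        ((-1 : Int), (0 : Int), List.replicate nums.length (0 : Int))).2.2 := by
    show ((PySem.List.pyRange 0 (PySem.List.len s) 1).foldl
      (fun (st : Int × Int × List Int) i =>
        let p := PySem.List.pyGetD s i (0, 0)
        if p.1 = st.1 then
          (p.1, st.2.1, PySem.List.pySetD st.2.2 p.2 st.2.1)
        else
          (p.1, i, PySem.List.pySetD st.2.2 p.2 i))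
      ((-1 : Int), (0 : Int), PySem.List.pyRepeat [(0 : Int)] (PySem.List.len s))).2.2 = _
    rw [PySem.List.enumerate_eq_map_pyRange s ((0:Int),(0:Int)), List.foldl_map]
    rw [PySem.List.pyRepeat_singleton]
    have hlen' : (PySem.List.len s).toNat = nums.length := by
      simp [PySem.List.len_eq, hlens]
    rw [hlen']
    rfl
  rw [hport]
  -- B side
  have halt : smallerThanCurrent_alt nums =
      nums.map (fun v => ((nums.countP (fun x => decide (x < v)) : Nat) : Int)) := by
    unfold smallerThanCurrent_alt
    apply List.map_congr_left
    intro v _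
    rw [PySem.List.foldl_ite_add_one (fun x => x < v) nums 0]
    simp
  rw [halt]
  -- elementwise equality
  apply List.ext_getElem
  · rw [hloop.1, hlens, List.length_map]
  · intro k h1 h2
    rw [List.length_map] at h2
    have hkmem : ((k : Int)) ∈ s.map (fun p => p.2) := by
      apply hpermsnd.mem_iff.2
      exact PySem.List.mem_pyRange_one.2 ⟨by positivity, by exact_mod_cast h2⟩
    rcases List.mem_map.1 hkmem with ⟨p, hp, hp2⟩
    rcases List.mem_iff_getElem.1 hp with ⟨j, hj, hjp⟩
    have hthis := hloop.2 j hj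
    rw [hjp] at hthis
    rcases hmemval p hp with ⟨m, hm, hpm⟩
    have hpsnd : p.2 = (m : Int) := by rw [hpm]
    have hmk : m = k := by omega
    subst hmk
    have hp1 : p.1 = nums[m] := by rw [hpm]
    have hp2n : p.2.toNat = m := by omega
    rw [hp2n, hp1, hcount] at hthis
    rw [List.getD_eq_getElem _ _ (by rw [hloop.1, hlens]; exact h2)] at hthis
    rw [hthis, List.getElem_map]

-- ===== VERDICT (by name: the statement is the Claim_ definition above) =====
theorem smallerThanCurrent_spec : Claim_equal_smallerThanCurrent := by
  intro nums _
  exact pv_main nums
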